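-- pv_equiv track=rewrite | github.com/DylanJoo/mdrag | oracle.py | maybe_chunking
-- ===== SOURCE A (Python) =====
-- def maybe_chunking(dlist, n=1024):
--     overlength = [(i, len(d.split()) > n) for i, d in enumerate(dlist)]
--
--     if any([o for _, o in overlength]):
--         to_return = []
--         for i, do_chunk in overlength:
--             if do_chunk:
--                 words = dlist[i].split()
--                 while len(words) > 0:
--                     to_return.append(" ".join(words[:512]))
--                     words = words[512:]
--             else:
--                 to_return.append(dlist[i])
--         return to_return
--     else:
--         return dlist
-- ===== SOURCE B (Python) =====
-- def maybe_chunking(dlist, n=1024):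
--     result = []
--     for d in dlist:
--         words = d.split()
--         if len(words) > n:
--             for i in range(0, len(words), 512):
--                 result.append(" ".join(words[i:i+512]))
--         else:
--             result.append(d)
--     return result
-- ===== Notes on version B (the rewrite author's own statement) =====
-- stated objective: simpler
-- what changed: Drops A's precomputed (index, flag) overlength list, the any() pre-scan and the conditional rebuild with dlist[i] index lookups; B does one unconditional pass over dlist, chunking each over-length document with a stepped range over word indices instead of A's destructive while-loop on the word list.
import Mathlib
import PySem

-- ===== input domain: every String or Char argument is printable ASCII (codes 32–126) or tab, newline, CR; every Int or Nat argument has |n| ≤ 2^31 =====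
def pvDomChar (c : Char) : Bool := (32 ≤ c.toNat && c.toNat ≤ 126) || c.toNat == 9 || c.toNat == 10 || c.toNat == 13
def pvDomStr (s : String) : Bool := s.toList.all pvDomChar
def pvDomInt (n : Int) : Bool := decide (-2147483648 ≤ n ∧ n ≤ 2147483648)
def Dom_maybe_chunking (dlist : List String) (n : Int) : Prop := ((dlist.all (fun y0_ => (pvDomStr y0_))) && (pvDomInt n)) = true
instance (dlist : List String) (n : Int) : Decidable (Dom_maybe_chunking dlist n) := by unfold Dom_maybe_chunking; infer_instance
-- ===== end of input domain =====

-- B drops A's precomputed (index, flag) list, any() pre-scan and dlist[i] lookups for one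
-- unconditional pass chunking via a stepped range (objective: simpler; return value only —
-- A returns the very same list object when nothing is over-length, B always builds a new list).

-- ===== PORT A =====
-- the 'while len(words) > 0: append " ".join(words[:512]); words = words[512:]' loop
def pvChunkWhile (words : List String) : List String :=
  if words.length > 0 then
    PySem.Str.join " " (PySem.List.slice words none (some 512)) ::
      pvChunkWhile (PySem.List.slice words (some 512) none)
  else []
termination_by words.length
decreasing_by
  rw [PySem.List.slice_from words (by norm_num)]
  simp only [List.length_drop]
  omega

def maybe_chunking (dlist : List String) (n : Int) : List String :=
  let overlength := (PySem.List.enumerate dlist).map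
    (fun p => (p.1, decide (((PySem.Str.split₀ p.2).length : Int) > n)))
  if (overlength.map (fun p => p.2)).any (fun o => o) then
    -- dlist[i]: i always a valid index here, so pyGetD's default is never used
    overlength.foldl (fun acc p =>
      if p.2 then
        acc ++ pvChunkWhile (PySem.Str.split₀ (PySem.List.pyGetD dlist p.1 ""))
      else acc ++ [PySem.List.pyGetD dlist p.1 ""]) []
  else dlist

-- ===== PORT B =====
def maybe_chunking_alt (dlist : List String) (n : Int) : List String :=
  dlist.foldl (fun acc d =>
    let words := PySem.Str.split₀ d
    if ((words.length : Int) > n) then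
      (PySem.List.pyRange 0 (words.length : Int) 512).foldl
        (fun a i => a ++ [PySem.Str.join " " (PySem.List.slice words (some i) (some (i + 512)))]) acc
    else acc ++ [d]) []

-- ===== PRECONDITION & SPEC =====
def Spec_maybe_chunking (dlist : List String) (n : Int) (out : List String) : Prop := out = maybe_chunking_alt dlist n
instance (dlist : List String) (n : Int) (out : List String) : Decidable (Spec_maybe_chunking dlist n out) := by unfold Spec_maybe_chunking; infer_instance

-- ===== CLAIM (what is proved, stated in full; the proofs are below) =====
def Claim_equal_maybe_chunking : Prop := ∀ (dlist : List String) (n : Int), Dom_maybe_chunking dlist n → Spec_maybe_chunking dlist n (maybe_chunking dlist n)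

-- ===== LEMMAS AND PROOFS =====

-- step-512 range as a cons
lemma pvRange512_cons (a b : Int) (h : a < b) :
    PySem.List.pyRange a b 512 = a :: PySem.List.pyRange (a + 512) b 512 := by
  rw [PySem.List.pyRange_of_pos a b (by norm_num : (0:Int) < 512),
      PySem.List.pyRange_of_pos (a + 512) b (by norm_num : (0:Int) < 512)]
  by_cases h2 : a + 512 < b
  · rw [if_pos h, if_pos h2]
    have hm : ((b - a + 512 - 1) / 512).toNat = ((b - (a + 512) + 512 - 1) / 512).toNat + 1 := by
      omega
    rw [hm, List.range_succ_eq_map]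
    simp only [List.map_cons, List.map_map]
    refine List.cons_eq_cons.mpr ⟨by simp, ?_⟩
    exact List.map_congr_left (fun k _ => by simp only [Function.comp, Nat.succ_eq_add_one]; push_cast; ring)
  · rw [if_pos h, if_neg h2]
    have hm : ((b - a + 512 - 1) / 512).toNat = 1 := by omega
    rw [hm]
    simp

-- shifting B's inner fold by one 512-block
lemma pvFoldShift (words : List String) (acc : List String) :
    (PySem.List.pyRange 512 (words.length : Int) 512).foldl
      (fun a i => a ++ [PySem.Str.join " " (PySem.List.slice words (some i) (some (i + 512)))]) acc
    = (PySem.List.pyRange 0 ((words.drop 512).length : Int) 512).foldl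
      (fun a i => a ++ [PySem.Str.join " " (PySem.List.slice (words.drop 512) (some i) (some (i + 512)))]) acc := by
  rw [PySem.List.pyRange_of_pos 512 (words.length : Int) (by norm_num : (0:Int) < 512),
      PySem.List.pyRange_of_pos 0 ((words.drop 512).length : Int) (by norm_num : (0:Int) < 512),
      List.foldl_map, List.foldl_map]
  have hcount :
      (if (512:Int) < (words.length : Int) then (((words.length : Int) - 512 + 512 - 1) / 512).toNat else 0)
      = (if (0:Int) < ((words.drop 512).length : Int) then ((((words.drop 512).length : Int) - 0 + 512 - 1) / 512).toNat else 0) := by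
    simp only [List.length_drop]
    split_ifs <;> omega
  rw [hcount]
  apply PySem.List.foldl_congr_mem'
  intro k _ a
  congr 2
  rw [show (512 + 512 * (k : Int)) = ((512 + 512 * k : Nat) : Int) by push_cast; ring,
      show (((512 + 512 * k : Nat) : Int) + 512) = ((512 + 512 * k : Nat) : Int) + ((512 : Nat) : Int) by norm_num,
      PySem.List.slice_natCast_add words (512 + 512 * k) 512,
      show (0 + 512 * (k : Int)) = ((512 * k : Nat) : Int) by push_cast; ring,
      show (((512 * k : Nat) : Int) + 512) = ((512 * k : Nat) : Int) + ((512 : Nat) : Int) by norm_num,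
      PySem.List.slice_natCast_add (words.drop 512) (512 * k) 512,
      List.drop_drop]

-- B's inner fold IS A's while-loop chunker
lemma pvChunkFoldAux : ∀ (m : Nat) (words : List String), words.length ≤ m → ∀ (acc : List String),
    (PySem.List.pyRange 0 (words.length : Int) 512).foldl
      (fun a i => a ++ [PySem.Str.join " " (PySem.List.slice words (some i) (some (i + 512)))]) acc
    = acc ++ pvChunkWhile words := by
  intro m
  induction m with
  | zero =>
    intro words hlen acc
    have h0 : words.length = 0 := by omega
    rw [pvChunkWhile, if_neg (by omega), h0]
    simp only [Nat.cast_zero]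
    rw [PySem.List.pyRange_of_pos 0 0 (by norm_num : (0:Int) < 512)]
    simp
  | succ m ih =>
    intro words hlen acc
    by_cases h0 : words.length = 0
    · rw [pvChunkWhile, if_neg (by omega), h0]
      simp only [Nat.cast_zero]
      rw [PySem.List.pyRange_of_pos 0 0 (by norm_num : (0:Int) < 512)]
      simp
    · have hpos : 0 < words.length := Nat.pos_of_ne_zero h0
      rw [pvChunkWhile, if_pos hpos]
      rw [pvRange512_cons 0 (words.length : Int) (by exact_mod_cast hpos)]
      rw [List.foldl_cons]
      have hz : (0:Int) + 512 = 512 := by norm_num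
      rw [hz, pvFoldShift]
      rw [ih (words.drop 512) (by simp only [List.length_drop]; omega)]
      have hfst : PySem.List.slice words (some (0:Int)) (some 512) = words.take 512 := by
        rw [PySem.List.slice_zero_start, PySem.List.slice_to words (by norm_num),
            show ((512:Int)).toNat = 512 from rfl]
      have htake : PySem.List.slice words none (some 512) = words.take 512 := by
        rw [PySem.List.slice_to words (by norm_num), show ((512:Int)).toNat = 512 from rfl]
      have hdrop : PySem.List.slice words (some 512) none = words.drop 512 := by
        rw [PySem.List.slice_from words (by norm_num), show ((512:Int)).toNat = 512 from rfl]
      rw [hfst, htake, hdrop]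
      simp

lemma pvChunkFold (words : List String) (acc : List String) :
    (PySem.List.pyRange 0 (words.length : Int) 512).foldl
      (fun a i => a ++ [PySem.Str.join " " (PySem.List.slice words (some i) (some (i + 512)))]) acc
    = acc ++ pvChunkWhile words :=
  pvChunkFoldAux words.length words le_rfl acc

-- the per-document output
def pvDoc (n : Int) (d : String) : List String :=
  if ((PySem.Str.split₀ d).length : Int) > n then pvChunkWhile (PySem.Str.split₀ d) else [d]

lemma pvAlt_eq_flatMap (dlist : List String) (n : Int) :
    maybe_chunking_alt dlist n = dlist.flatMap (pvDoc n) := by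
  unfold maybe_chunking_alt
  rw [PySem.List.foldl_congr_mem' dlist _
    (fun acc d => acc ++ pvDoc n d) []
    (by
      intro d _ acc
      simp only [pvDoc]
      by_cases hc : ((PySem.Str.split₀ d).length : Int) > n
      · rw [if_pos hc, if_pos hc, pvChunkFold]
      · rw [if_neg hc, if_neg hc])]
  rw [PySem.List.foldl_append_eq_flatMap]
  simp

lemma pvA_fold_eq (dlist : List String) (n : Int) :
    ((PySem.List.enumerate dlist).map
      (fun p => (p.1, decide (((PySem.Str.split₀ p.2).length : Int) > n)))).foldl
      (fun acc p =>
        if p.2 then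
          acc ++ pvChunkWhile (PySem.Str.split₀ (PySem.List.pyGetD dlist p.1 ""))
        else acc ++ [PySem.List.pyGetD dlist p.1 ""]) []
    = dlist.flatMap (pvDoc n) := by
  rw [PySem.List.foldl_congr_mem' _ _
    (fun acc p => acc ++ (if p.2 then pvChunkWhile (PySem.Str.split₀ (PySem.List.pyGetD dlist p.1 "")) else [PySem.List.pyGetD dlist p.1 ""])) []
    (by intro p _ acc; by_cases hp : p.2 = true <;> simp [hp])]
  rw [PySem.List.foldl_append_eq_flatMap]
  rw [List.flatMap_map]
  rw [PySem.List.enumerate_eq_map_pyRange dlist ""]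
  rw [List.flatMap_map]
  have : (fun j => (if decide (((PySem.Str.split₀ (PySem.List.pyGetD dlist j "")).length : Int) > n) then pvChunkWhile (PySem.Str.split₀ (PySem.List.pyGetD dlist j "")) else [PySem.List.pyGetD dlist j ""]))
       = (fun j => pvDoc n (PySem.List.pyGetD dlist j "")) := by
    funext j
    simp [pvDoc]
  simp only [this]
  rw [← List.flatMap_map (fun j => PySem.List.pyGetD dlist j "") (pvDoc n),
      PySem.List.map_pyGetD_pyRange_zero dlist ""]
  simp

lemma pvFlags_eq (dlist : List String) (n : Int) :
    ((PySem.List.enumerate dlist).map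
      (fun p => (p.1, decide (((PySem.Str.split₀ p.2).length : Int) > n)))).map (fun p => p.2)
    = dlist.map (fun d => decide (((PySem.Str.split₀ d).length : Int) > n)) := by
  rw [List.map_map]
  have : ((fun p => p.2) ∘ (fun (p : Int × String) => (p.1, decide (((PySem.Str.split₀ p.2).length : Int) > n))))
       = (fun d => decide (((PySem.Str.split₀ d).length : Int) > n)) ∘ (fun (p : Int × String) => p.2) := by
    funext p; rfl
  rw [this, ← List.map_map, PySem.List.map_snd_enumerate]

-- ===== VERDICT (by name: the statement is the Claim_ definition above) =====
theorem maybe_chunking_spec : Claim_equal_maybe_chunking := by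
  intro dlist n _
  unfold Spec_maybe_chunking maybe_chunking
  simp only []
  rw [pvAlt_eq_flatMap, pvFlags_eq]
  by_cases hany : (dlist.map (fun d => decide (((PySem.Str.split₀ d).length : Int) > n))).any (fun o => o) = true
  · rw [if_pos hany, pvA_fold_eq]
  · rw [if_neg hany]
    rw [List.any_map] at hany
    have hall : ∀ d ∈ dlist, ¬ (((PySem.Str.split₀ d).length : Int) > n) := by
      intro d hd
      have := (List.any_eq_false.mp (Bool.eq_false_iff.mpr hany)) d hd
      simpa using this
    rw [List.flatMap_congr (g := fun d => [d]) (fun d hd => by simp [pvDoc, hall d hd])]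
    rw [List.flatMap_singleton']
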